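-- pv_equiv track=rewrite | github.com/adpirz/eye-or | src/main.py | get_common_module_prefix
-- ===== SOURCE A (Python) =====
-- def get_common_module_prefix(modules):
--     """Find the common prefix of module paths using dot notation."""
--     if not modules:
--         return ""
--
--     # Split all modules into their components
--     split_modules = [mod.split(".") for mod in modules]
--
--     # Find the common prefix components
--     common = []
--     for parts in zip(*split_modules):
--         if len(set(parts)) != 1:
--             break
--         common.append(parts[0])
--
--     return ".".join(common)
-- ===== SOURCE B (Python) =====
-- def get_common_module_prefix(modules):
--     """Find the common prefix of module paths using dot notation."""
--     if not modules:
--         return ""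
--     prefix = modules[0].split(".")
--     for mod in modules[1:]:
--         parts = mod.split(".")
--         i = 0
--         while i < len(prefix) and i < len(parts) and prefix[i] == parts[i]:
--             i += 1
--         prefix = prefix[:i]
--     return ".".join(prefix)
-- ===== Notes on version B (the rewrite author's own statement) =====
-- stated objective: alternative
-- what changed: Replaces the column-wise scan (split all modules, zip across them, test each column with a set) by a row-wise fold that shortens a running prefix against each module, so no transposed tuples or per-column sets are built.
import Mathlib
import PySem

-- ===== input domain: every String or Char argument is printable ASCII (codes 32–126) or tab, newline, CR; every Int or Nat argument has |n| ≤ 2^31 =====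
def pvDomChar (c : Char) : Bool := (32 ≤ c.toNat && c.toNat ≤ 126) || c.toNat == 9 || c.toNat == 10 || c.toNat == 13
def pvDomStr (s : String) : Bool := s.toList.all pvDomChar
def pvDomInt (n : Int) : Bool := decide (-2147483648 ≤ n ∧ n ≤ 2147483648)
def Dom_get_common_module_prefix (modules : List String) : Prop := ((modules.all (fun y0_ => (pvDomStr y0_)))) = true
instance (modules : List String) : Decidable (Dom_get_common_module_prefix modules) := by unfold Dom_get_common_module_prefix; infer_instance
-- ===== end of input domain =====

-- B replaces A's column-wise scan (split all, zip across modules, per-column set test)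
-- by a row-wise fold that shortens a running prefix against each module; alternative decomposition, same cost.


-- ===== PORT A =====
-- mod.split(".") — sep is the nonempty literal ".", so split? is always 'some'
def pvSplitDot (mod : String) : List String := (PySem.Str.split? mod ".").getD []

-- termination measure facts for pvZipCols, cited there by name
theorem pvSum_tail_le (xs : List (List String)) :
    ((xs.map (fun l => l.tail)).map List.length).sum ≤ (xs.map List.length).sum := by
  induction xs with
  | nil => simp
  | cons y ys ih =>
    simp only [List.map_cons, List.sum_cons]
    have : y.tail.length ≤ y.length := by cases y <;> simp
    omega

theorem pvZip_dec (xss : List (List String)) (h1 : xss ≠ [])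
    (h2 : xss.any (fun l => l.isEmpty) = false) :
    ((xss.map (fun l => l.tail)).map List.length).sum < (xss.map List.length).sum := by
  induction xss with
  | nil => exact absurd rfl h1
  | cons x xs ih =>
    simp only [List.any_cons, Bool.or_eq_false_iff] at h2
    have hx : x ≠ [] := by
      rcases h2 with ⟨hx, _⟩
      simpa [List.isEmpty_iff] using hx
    have hxl : x.tail.length < x.length := by
      cases x with
      | nil => exact absurd rfl hx
      | cons a t => simp
    have hle := pvSum_tail_le xs
    simp only [List.map_cons, List.sum_cons]
    omega

-- zip(*split_modules): the list of columns, cut off at the shortest row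
def pvZipCols (xss : List (List String)) : List (List String) :=
  if h : xss = [] ∨ xss.any (fun l => l.isEmpty) then []
  else (xss.map (fun l => l.headD "")) :: pvZipCols (xss.map (fun l => l.tail))
  termination_by (xss.map List.length).sum
  decreasing_by
    rw [not_or] at h
    simpa using pvZip_dec xss h.1 (eq_false_of_ne_true h.2)

-- the 'for parts in zip(*split_modules)' loop with accumulator 'common'
def pvLoopA (cols : List (List String)) (common : List String) : List String :=
  match cols with
  | [] => common
  | parts :: rest =>
      if PySem.Set.len (PySem.Set.ofList parts) ≠ 1 then common
      else pvLoopA rest (common ++ [parts.headD ""])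

def get_common_module_prefix (modules : List String) : String :=
  if modules = [] then ""
  else
    let split_modules := modules.map pvSplitDot
    PySem.Str.join "." (pvLoopA (pvZipCols split_modules) [])

-- ===== PORT B =====
-- the inner while loop + prefix[:i]: longest leading run of equal components
def pvCommonPref (pre parts : List String) : List String :=
  match pre, parts with
  | x :: xs, y :: ys => if x = y then x :: pvCommonPref xs ys else []
  | _, _ => []

def get_common_module_prefix_alt (modules : List String) : String :=
  match modules with
  | [] => ""
  | m :: rest =>
      PySem.Str.join "." (rest.foldl (fun pre mod => pvCommonPref pre (pvSplitDot mod)) (pvSplitDot m))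

-- ===== PRECONDITION & SPEC =====
def Spec_get_common_module_prefix (modules : List String) (out : String) : Prop := out = get_common_module_prefix_alt modules
instance (modules : List String) (out : String) : Decidable (Spec_get_common_module_prefix modules out) := by unfold Spec_get_common_module_prefix; infer_instance

-- ===== CLAIM (what is proved, stated in full; the proofs are below) =====
def Claim_equal_get_common_module_prefix : Prop := ∀ (modules : List String), Dom_get_common_module_prefix modules → Spec_get_common_module_prefix modules (get_common_module_prefix modules)

-- ===== LEMMAS AND PROOFS =====

theorem pvCommonPref_prefix_left (a b : List String) : pvCommonPref a b <+: a := by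
  induction a generalizing b with
  | nil => simp [pvCommonPref]
  | cons x xs ih =>
    cases b with
    | nil => simp [pvCommonPref]
    | cons y ys =>
      simp only [pvCommonPref]
      split
      · exact List.cons_prefix_cons.mpr ⟨rfl, ih ys⟩
      · simp

theorem pvCommonPref_prefix_right (a b : List String) : pvCommonPref a b <+: b := by
  induction a generalizing b with
  | nil => simp [pvCommonPref]
  | cons x xs ih =>
    cases b with
    | nil => simp [pvCommonPref]
    | cons y ys =>
      simp only [pvCommonPref]
      split
      · next h => exact h ▸ List.cons_prefix_cons.mpr ⟨rfl, ih ys⟩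
      · simp

-- the fold's result is a prefix of its seed and of every folded row
theorem foldl_cp_prefix (rest : List (List String)) (p : List String) :
    (rest.foldl pvCommonPref p <+: p) ∧ ∀ m ∈ rest, rest.foldl pvCommonPref p <+: m := by
  induction rest generalizing p with
  | nil => simp
  | cons r rs ih =>
    simp only [List.foldl_cons]
    obtain ⟨g1, g2⟩ := ih (pvCommonPref p r)
    refine ⟨g1.trans (pvCommonPref_prefix_left _ _), ?_⟩
    intro m hm
    rcases List.mem_cons.mp hm with rfl | hm
    · exact g1.trans (pvCommonPref_prefix_right _ _)
    · exact g2 m hm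

-- pulling one shared head component out of a fold
theorem foldl_cons_head (rest : List (List String)) (h : String) (p : List String) :
    (∀ l ∈ rest, ∃ t, l = h :: t) →
    rest.foldl pvCommonPref (h :: p) = h :: (rest.map List.tail).foldl pvCommonPref p := by
  induction rest generalizing p with
  | nil => simp
  | cons r rs ih =>
    intro hall
    obtain ⟨t, rfl⟩ := hall r (by simp)
    have hstep : pvCommonPref (h :: p) (h :: t) = h :: pvCommonPref p t := by
      simp [pvCommonPref]
    rw [List.foldl_cons, hstep, List.map_cons, List.tail_cons, List.foldl_cons,
      ih (pvCommonPref p t) (fun l hl => hall l (List.mem_cons_of_mem _ hl))]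

theorem foldl_map_splitDot (rest : List String) (p : List String) :
    rest.foldl (fun pre mod => pvCommonPref pre (pvSplitDot mod)) p
      = (rest.map pvSplitDot).foldl pvCommonPref p := by
  induction rest generalizing p with
  | nil => rfl
  | cons r rs ih => simp [ih]

-- a nonempty list whose elements all equal h dedups to [h]
theorem ofList_all_eq (l : List String) (h : String) (hne : l ≠ []) (hall : ∀ x ∈ l, x = h) :
    PySem.Set.ofList l = [h] := by
  have hmem : h ∈ PySem.Set.ofList l := by
    rw [PySem.Set.mem_ofList]
    cases l with
    | nil => exact absurd rfl hne
    | cons a t => exact (hall a (by simp)) ▸ List.mem_cons_self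
  have hnd : (PySem.Set.ofList l).Nodup := PySem.Set.nodup_ofList l
  have hsub : ∀ x ∈ PySem.Set.ofList l, x = h := by
    intro x hx
    exact hall x ((PySem.Set.mem_ofList l x).mp hx)
  match hs : PySem.Set.ofList l with
  | [] => rw [hs] at hmem; simp at hmem
  | [a] => rw [hs] at hsub; simp [hsub a (by simp)]
  | a :: b :: t =>
    rw [hs] at hsub hnd
    have ha := hsub a (by simp)
    have hb := hsub b (by simp)
    subst ha; subst hb
    simp at hnd

theorem ofList_len_two (l : List String) (a b : String) (ha : a ∈ l) (hb : b ∈ l) (hab : a ≠ b) :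
    PySem.Set.len (PySem.Set.ofList l) ≠ 1 := by
  have h1 : a ∈ PySem.Set.ofList l := (PySem.Set.mem_ofList l a).mpr ha
  have h2 : b ∈ PySem.Set.ofList l := (PySem.Set.mem_ofList l b).mpr hb
  unfold PySem.Set.len
  intro hlen
  have hl1 : (PySem.Set.ofList l).length = 1 := by exact_mod_cast hlen
  obtain ⟨x, hx⟩ := List.length_eq_one_iff.mp hl1
  rw [hx] at h1 h2
  simp at h1 h2
  exact hab (h1.trans h2.symm)

theorem pvLoopA_acc (cols : List (List String)) (acc : List String) :
    pvLoopA cols acc = acc ++ pvLoopA cols [] := by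
  induction cols generalizing acc with
  | nil => simp [pvLoopA]
  | cons c cs ih =>
    simp only [pvLoopA]
    split
    · simp
    · rw [ih, ih ([] ++ [c.headD ""])]
      simp

-- the key correspondence: column-wise loop over pvZipCols = row-wise fold of pvCommonPref
theorem pvKey (xss : List (List String)) (x0 : List String) :
    pvLoopA (pvZipCols (x0 :: xss)) [] = xss.foldl pvCommonPref x0 := by
  generalize hn : ((x0 :: xss).map List.length).sum = n
  induction n using Nat.strong_induction_on generalizing x0 xss with
  | _ n ih =>
  by_cases hemp : (x0 :: xss).any (fun l => l.isEmpty)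
  · -- some row is empty: both sides are []
    rw [pvZipCols.eq_def, dif_pos (Or.inr hemp)]
    simp only [pvLoopA]
    simp only [List.any_eq_true, List.mem_cons] at hemp
    obtain ⟨l, hl, hle⟩ := hemp
    rw [List.isEmpty_iff] at hle
    subst hle
    rcases hl with rfl | hl
    · exact (List.prefix_nil.mp (foldl_cp_prefix xss []).1).symm
    · exact (List.prefix_nil.mp ((foldl_cp_prefix xss x0).2 [] hl)).symm
  · -- all rows nonempty: look at the first column
    rw [pvZipCols.eq_def, dif_neg (by simp [hemp])]
    rw [Bool.not_eq_true, List.any_eq_false] at hemp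
    have hne : ∀ l ∈ x0 :: xss, l ≠ [] := by
      intro l hl
      simpa [List.isEmpty_iff] using hemp l hl
    by_cases hsame : ∀ l ∈ x0 :: xss, l.headD "" = x0.headD ""
    · -- all heads equal: column passes the set test
      have hcol : PySem.Set.ofList ((x0 :: xss).map (fun l => l.headD "")) = [x0.headD ""] := by
        apply ofList_all_eq _ _ (by simp)
        intro x hx
        obtain ⟨l, hl, rfl⟩ := List.mem_map.mp hx
        exact hsame l hl
      simp only [pvLoopA, hcol]
      rw [if_neg (by simp [PySem.Set.len])]
      rw [pvLoopA_acc]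
      simp only [List.nil_append, List.singleton_append]
      have hx0 : x0 = x0.headD "" :: x0.tail := by
        cases x0 with
        | nil => exact absurd rfl (hne [] (by simp))
        | cons a t => simp
      have hmeas : ((x0.tail :: xss.map List.tail).map List.length).sum < n := by
        rw [← hn]
        simp only [List.map_cons, List.sum_cons]
        have hx0l : x0.tail.length < x0.length := by
          conv_rhs => rw [hx0]
          simp
        have hle2 : ((xss.map List.tail).map List.length).sum ≤ (xss.map List.length).sum :=
          pvSum_tail_le xss
        omega
      have hrec := ih _ hmeas (xss.map List.tail) x0.tail rfl
      have hfold : xss.foldl pvCommonPref x0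
          = x0.headD "" :: (xss.map List.tail).foldl pvCommonPref x0.tail := by
        conv_lhs => rw [hx0]
        apply foldl_cons_head
        intro l hl
        have hl' : l ≠ [] := hne l (List.mem_cons_of_mem _ hl)
        refine ⟨l.tail, ?_⟩
        conv_lhs => rw [show l = l.headD "" :: l.tail by
          cases l with
          | nil => exact absurd rfl hl'
          | cons a t => simp]
        rw [hsame l (List.mem_cons_of_mem _ hl)]
      rw [hfold]
      congr 1
    · -- some head differs: set test fails, both sides stop at the empty prefix
      rw [not_forall] at hsame
      obtain ⟨l, hlq⟩ := hsame
      rw [_root_.not_imp] at hlq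
      obtain ⟨hl, hld⟩ := hlq
      simp only [pvLoopA]
      rw [if_pos]
      · symm
        by_contra hne2
        match hres : xss.foldl pvCommonPref x0 with
        | [] => exact hne2 hres
        | a :: t =>
          have hhead : ∀ m ∈ x0 :: xss, m.headD "" = a := by
            intro m hm
            have hp : (a :: t) <+: m := by
              rcases List.mem_cons.mp hm with rfl | hm'
              · exact hres ▸ (foldl_cp_prefix xss m).1
              · exact hres ▸ (foldl_cp_prefix xss x0).2 m hm'
            obtain ⟨s, hs⟩ := hp
            rw [← hs]
            simp
          exact hld ((hhead l hl).trans (hhead x0 (by simp)).symm)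
      · apply ofList_len_two _ (l.headD "") (x0.headD "")
        · exact List.mem_map.mpr ⟨l, hl, rfl⟩
        · exact List.mem_map.mpr ⟨x0, by simp, rfl⟩
        · exact hld

-- ===== VERDICT (by name: the statement is the Claim_ definition above) =====
theorem get_common_module_prefix_spec : Claim_equal_get_common_module_prefix := by
  intro modules _
  unfold Spec_get_common_module_prefix get_common_module_prefix get_common_module_prefix_alt
  cases modules with
  | nil => rfl
  | cons m rest =>
    simp only [if_neg (List.cons_ne_nil m rest), List.map_cons]
    rw [pvKey (rest.map pvSplitDot) (pvSplitDot m), ← foldl_map_splitDot]
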